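-- pv_equiv track=rewrite | github.com/BenFaruna/49ja_game | helper_functions.py | color_decision
-- ===== SOURCE A (Python) =====
-- def color_decision(color_num: dict) -> str:
--     """
--     function decides the highest color in a dictionary and returns the highest color, or None if two are equal
--     :param color_num: a dictionary containing color count
--     :return: a string that shows the color with the highest count
--     """
--     max_color = ('None', 0)
--     for color in color_num.items():
--         if color[1] > max_color[1]:
--             max_color = color
--         elif color[1] == max_color[1]:
--             max_color = ('None', max_color[1])
--     return max_color[0]
-- ===== SOURCE B (Python) =====
-- def color_decision(color_num: dict) -> str:
--     """Max-then-filter: find the maximum count, collect the colors having it,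
--     answer only if the maximum is positive and unique."""
--     if not color_num:
--         return 'None'
--     m = max(color_num.values())
--     winners = [c for c, v in color_num.items() if v == m]
--     return winners[0] if m > 0 and len(winners) == 1 else 'None'
-- ===== Notes on version B (the rewrite author's own statement) =====
-- stated objective: simpler
-- what changed: Replaces the single running-max loop with tie-blanking state by a two-pass max-then-filter: compute the maximum of the counts, collect the colors that attain it, and answer only when the maximum is positive and attained exactly once.
import Mathlib
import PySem

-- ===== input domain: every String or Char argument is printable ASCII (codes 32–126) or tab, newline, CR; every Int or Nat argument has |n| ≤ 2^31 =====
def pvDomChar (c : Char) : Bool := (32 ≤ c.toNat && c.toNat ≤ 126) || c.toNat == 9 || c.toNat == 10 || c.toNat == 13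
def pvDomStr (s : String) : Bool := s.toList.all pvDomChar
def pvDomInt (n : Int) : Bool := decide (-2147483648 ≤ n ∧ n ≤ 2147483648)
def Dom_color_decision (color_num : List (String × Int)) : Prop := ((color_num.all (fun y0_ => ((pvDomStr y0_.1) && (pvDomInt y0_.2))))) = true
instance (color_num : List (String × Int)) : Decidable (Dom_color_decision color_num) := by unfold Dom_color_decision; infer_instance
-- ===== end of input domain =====

-- B replaces A's single running-max loop with tie-blanking state by a two-pass
-- max-then-filter (objective: simpler).

-- ===== PORT A =====
-- running-max loop: take a strictly greater count, blank the name on a tie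
def color_decision (color_num : List (String × Int)) : String :=
  (color_num.foldl
    (fun max_color color =>
      if max_color.2 < color.2 then color
      else if color.2 = max_color.2 then ("None", max_color.2)
      else max_color)
    ("None", 0)).1

-- ===== PORT B =====
-- max(values) via PySem.List.max? (Python max on a nonempty list), then filter
def color_decision_alt (color_num : List (String × Int)) : String :=
  if color_num = [] then "None"
  else
    match PySem.List.max? (color_num.map Prod.snd) (fun v => v) with
    | none => "None"  -- unreachable: the list is nonempty
    | some m =>
      let winners := (color_num.filter (fun p => p.2 = m)).map Prod.fst
      if 0 < m ∧ winners.length = 1 then winners.head! else "None"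

-- ===== PRECONDITION & SPEC =====
def Spec_color_decision (color_num : List (String × Int)) (out : String) : Prop := out = color_decision_alt color_num
instance (color_num : List (String × Int)) (out : String) : Decidable (Spec_color_decision color_num out) := by unfold Spec_color_decision; infer_instance

-- ===== CLAIM (what is proved, stated in full; the proofs are below) =====
def Claim_equal_color_decision : Prop := ∀ (color_num : List (String × Int)), Dom_color_decision color_num → Spec_color_decision color_num (color_decision color_num)

-- ===== LEMMAS AND PROOFS =====

-- A's loop body
def pvStep (mc c : String × Int) : String × Int :=
  if mc.2 < c.2 then c
  else if c.2 = mc.2 then ("None", mc.2)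
  else mc

lemma color_decision_eq (l : List (String × Int)) :
    color_decision l = (l.foldl pvStep ("None", 0)).1 := rfl

-- running maximum of the counts, started at x
def pvM (l : List (String × Int)) (x : Int) : Int := (l.map Prod.snd).foldl max x

lemma foldl_max_comm (l : List Int) (a b : Int) :
    l.foldl max (max a b) = max a (l.foldl max b) := by
  induction l generalizing b with
  | nil => rfl
  | cons c t ih =>
      simp only [List.foldl_cons]
      rw [max_assoc, ih]

lemma le_pvM (l : List (String × Int)) (x : Int) : x ≤ pvM l x :=
  (PySem.List.le_foldl_max (l.map Prod.snd) x).1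

-- characterisation of A's running-max/tie-blanking loop, for an arbitrary start state
lemma pvStep_foldl_fst (l : List (String × Int)) :
    ∀ (s : String) (x : Int),
    (l.foldl pvStep (s, x)).1 =
      if pvM l x = x then
        (if l.countP (fun q => q.2 = x) = 0 then s else "None")
      else
        (if l.countP (fun q => q.2 = pvM l x) = 1
         then ((l.filter (fun q => q.2 = pvM l x)).map Prod.fst).head!
         else "None") := by
  induction l with
  | nil => intro s x; simp [pvM]
  | cons p t ih =>
      obtain ⟨ps, px⟩ := p
      intro s x
      simp only [List.foldl_cons]
      have hMc : pvM ((ps, px) :: t) x = pvM t (max x px) := by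
        simp [pvM]
      by_cases h1 : x < px
      · have hstep : pvStep (s, x) (ps, px) = (ps, px) := by simp [pvStep, h1]
        rw [hstep, ih ps px]
        have hMx : pvM ((ps, px) :: t) x = pvM t px := by
          rw [hMc]; congr 1; omega
        have hple := le_pvM t px
        have hMne : ¬ pvM ((ps, px) :: t) x = x := by rw [hMx]; omega
        rw [if_neg hMne, hMx]
        by_cases hP : pvM t px = px
        · rw [if_pos hP]
          by_cases hz : t.countP (fun q => q.2 = px) = 0
          · rw [if_pos hz]
            have hc1 : ((ps, px) :: t).countP (fun q => q.2 = pvM t px) = 1 := by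
              rw [List.countP_cons]; simp [hP, hz]
            rw [if_pos hc1]
            have hf : ((ps, px) :: t).filter (fun q => q.2 = pvM t px) =
                (ps, px) :: t.filter (fun q => q.2 = pvM t px) := by
              rw [List.filter_cons]; simp [hP]
            rw [hf]; simp
          · rw [if_neg hz]
            have e : ((ps, px) :: t).countP (fun q => q.2 = pvM t px) =
                t.countP (fun q => q.2 = px) + 1 := by
              rw [List.countP_cons, hP]; simp
            have hc : ¬ ((ps, px) :: t).countP (fun q => q.2 = pvM t px) = 1 := by
              rw [e]; omega
            rw [if_neg hc]
        · rw [if_neg hP]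
          have hne : ¬ px = pvM t px := by omega
          have hcnt : ((ps, px) :: t).countP (fun q => q.2 = pvM t px) =
              t.countP (fun q => q.2 = pvM t px) := by
            rw [List.countP_cons]; simp [hne]
          have hfil : ((ps, px) :: t).filter (fun q => q.2 = pvM t px) =
              t.filter (fun q => q.2 = pvM t px) := by
            rw [List.filter_cons]; simp [hne]
          rw [hcnt, hfil]
      · by_cases h2 : px = x
        · have hstep : pvStep (s, x) (ps, px) = ("None", x) := by simp [pvStep, h2]
          rw [hstep, ih "None" x]
          have hMx : pvM ((ps, px) :: t) x = pvM t x := by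
            rw [hMc]; congr 1; omega
          rw [hMx]
          by_cases hP : pvM t x = x
          · rw [if_pos hP, if_pos hP]
            have hc : ¬ ((ps, px) :: t).countP (fun q => q.2 = x) = 0 := by
              rw [List.countP_cons]; simp [h2]
            rw [if_neg hc]
            split <;> rfl
          · rw [if_neg hP, if_neg hP]
            have hxle := le_pvM t x
            have hne : ¬ px = pvM t x := by omega
            have hcnt : ((ps, px) :: t).countP (fun q => q.2 = pvM t x) =
                t.countP (fun q => q.2 = pvM t x) := by
              rw [List.countP_cons]; simp [hne]
            have hfil : ((ps, px) :: t).filter (fun q => q.2 = pvM t x) =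
                t.filter (fun q => q.2 = pvM t x) := by
              rw [List.filter_cons]; simp [hne]
            rw [hcnt, hfil]
        · have hstep : pvStep (s, x) (ps, px) = (s, x) := by simp [pvStep, h1, h2]
          rw [hstep, ih s x]
          have hMx : pvM ((ps, px) :: t) x = pvM t x := by
            rw [hMc]; congr 1; omega
          rw [hMx]
          by_cases hP : pvM t x = x
          · rw [if_pos hP, if_pos hP]
            have hcnt : ((ps, px) :: t).countP (fun q => q.2 = x) =
                t.countP (fun q => q.2 = x) := by
              rw [List.countP_cons]; simp [h2]
            rw [hcnt]
          · rw [if_neg hP, if_neg hP]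
            have hxle := le_pvM t x
            have hne : ¬ px = pvM t x := by omega
            have hcnt : ((ps, px) :: t).countP (fun q => q.2 = pvM t x) =
                t.countP (fun q => q.2 = pvM t x) := by
              rw [List.countP_cons]; simp [hne]
            have hfil : ((ps, px) :: t).filter (fun q => q.2 = pvM t x) =
                t.filter (fun q => q.2 = pvM t x) := by
              rw [List.filter_cons]; simp [hne]
            rw [hcnt, hfil]

-- evaluation of B on a nonempty list
lemma alt_cons (ps : String) (px : Int) (t : List (String × Int)) :
    color_decision_alt ((ps, px) :: t) =
      if 0 < pvM t px ∧
          ((((ps, px) :: t).filter (fun q => q.2 = pvM t px)).map Prod.fst).length = 1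
      then ((((ps, px) :: t).filter (fun q => q.2 = pvM t px)).map Prod.fst).head!
      else "None" := by
  unfold color_decision_alt
  rw [if_neg (by simp : ¬ (ps, px) :: t = [])]
  rw [show ((ps, px) :: t).map Prod.snd = px :: t.map Prod.snd from rfl,
      PySem.List.max?_id_cons]
  rfl

-- ===== VERDICT (by name: the statement is the Claim_ definition above) =====
theorem color_decision_spec : Claim_equal_color_decision := by
  intro l _
  show color_decision l = color_decision_alt l
  cases l with
  | nil => rfl
  | cons p t =>
      obtain ⟨ps, px⟩ := p
      rw [color_decision_eq, pvStep_foldl_fst, alt_cons]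
      have hM0 : pvM ((ps, px) :: t) 0 = max 0 (pvM t px) := by
        simp only [pvM, List.map_cons, List.foldl_cons]
        exact foldl_max_comm (t.map Prod.snd) 0 px
      have hple := le_pvM t px
      by_cases hpos : 0 < pvM t px
      · have hMeq : pvM ((ps, px) :: t) 0 = pvM t px := by omega
        rw [hMeq, if_neg (by omega)]
        have hlen : (((ps, px) :: t).filter (fun q => q.2 = pvM t px)).length =
            ((ps, px) :: t).countP (fun q => q.2 = pvM t px) :=
          List.countP_eq_length_filter.symm
        by_cases hc : ((ps, px) :: t).countP (fun q => q.2 = pvM t px) = 1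
        · rw [if_pos hc, if_pos ⟨hpos, by simp [hlen, hc]⟩]
        · rw [if_neg hc, if_neg (by
            rintro ⟨_, hl⟩
            exact hc (by simpa [hlen] using hl))]
      · have hM00 : pvM ((ps, px) :: t) 0 = 0 := by omega
        have hB : ¬ (0 < pvM t px ∧
            ((((ps, px) :: t).filter (fun q => q.2 = pvM t px)).map Prod.fst).length = 1) :=
          fun h => hpos h.1
        rw [if_pos hM00, if_neg hB]
        split <;> rfl
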